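-- pv_equiv track=rewrite | github.com/GrainedCube2214/Advent-Of-Code-2025 | Day 1/solution.py | newRotateDial
-- ===== SOURCE A (Python) =====
-- def newRotateDial(instr, position):
--     direction = -1 if instr[0] == 'L' else 1
--     steps = int(instr[1:])
--
--     # Count full cycles
--     full_cycles, remainder = divmod(steps, 100)
--     crossings = full_cycles
--
--     # Count crossings in remaining steps
--     for i in range(1, remainder + 1):
--         if (position + direction * i) % 100 == 0:
--             crossings += 1
--
--     # Update position
--     position = (position + direction * steps) % 100
--     return position, crossings
-- ===== SOURCE B (Python) =====
-- def newRotateDial(instr, position):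
--     direction = -1 if instr[0] == 'L' else 1
--     steps = int(instr[1:])
--     full_cycles, remainder = divmod(steps, 100)
--     i0 = (-direction * position) % 100
--     crossings = full_cycles + (1 if 0 < i0 <= remainder else 0)
--     return (position + direction * steps) % 100, crossings
-- ===== Notes on version B (the rewrite author's own statement) =====
-- stated objective: simpler
-- what changed: The per-step crossing loop over range(1, remainder+1) is replaced by a closed-form modular test: the unique in-remainder step that lands on 0 is i0 = (-direction*position) % 100, counted iff 0 < i0 <= remainder.
import Mathlib
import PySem

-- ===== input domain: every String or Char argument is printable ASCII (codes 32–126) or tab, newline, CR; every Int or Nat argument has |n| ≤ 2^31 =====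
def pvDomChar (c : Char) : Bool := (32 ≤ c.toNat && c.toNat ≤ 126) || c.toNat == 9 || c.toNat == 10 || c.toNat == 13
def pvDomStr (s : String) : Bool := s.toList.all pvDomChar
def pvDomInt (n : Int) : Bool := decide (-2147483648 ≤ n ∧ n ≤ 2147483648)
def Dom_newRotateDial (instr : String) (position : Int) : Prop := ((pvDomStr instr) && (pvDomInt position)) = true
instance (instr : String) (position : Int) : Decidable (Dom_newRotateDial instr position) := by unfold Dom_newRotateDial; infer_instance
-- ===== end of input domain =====

-- B replaces A's per-step crossing loop by a closed-form modular-arithmetic test (simpler, no iteration).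

-- ===== PORT A =====
def newRotateDial (instr : String) (position : Int) : Int × Int :=
  match PySem.Str.pyGet? instr 0, PySem.Int.ofStr? (PySem.Str.slice instr (some 1) none) with
  | some c, some steps =>
    let direction : Int := if c = 'L' then -1 else 1
    let full_cycles := PySem.Int.floordiv steps 100
    let remainder := PySem.Int.mod steps 100
    let crossings :=
      (PySem.List.pyRange 1 (remainder + 1) 1).foldl
        (fun cr i => if PySem.Int.mod (position + direction * i) 100 == 0 then cr + 1 else cr)
        full_cycles
    (PySem.Int.mod (position + direction * steps) 100, crossings)
  | _, _ => (0, 0)  -- Python raises here (empty instr / non-int tail); excluded by Pre_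

-- ===== PORT B =====
def newRotateDial_alt (instr : String) (position : Int) : Int × Int :=
  match PySem.Str.pyGet? instr 0 with
  | none => (0, 0)
  | some c =>
    match PySem.Int.ofStr? (PySem.Str.slice instr (some 1) none) with
    | none => (0, 0)
    | some steps =>
      let direction : Int := if c = 'L' then -1 else 1
      let full_cycles := PySem.Int.floordiv steps 100
      let remainder := PySem.Int.mod steps 100
      let i0 := PySem.Int.mod (-direction * position) 100
      let crossings := full_cycles + (if 0 < i0 ∧ i0 ≤ remainder then 1 else 0)
      (PySem.Int.mod (position + direction * steps) 100, crossings)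

-- ===== PRECONDITION & SPEC =====
-- Pre_ excludes exactly the inputs where Python A raises: empty instr (IndexError) or instr[1:] not an int literal (ValueError).
def Pre_newRotateDial (instr : String) (position : Int) : Prop :=
  (PySem.Str.pyGet? instr 0).isSome ∧ (PySem.Int.ofStr? (PySem.Str.slice instr (some 1) none)).isSome
instance (instr : String) (position : Int) : Decidable (Pre_newRotateDial instr position) := by
  unfold Pre_newRotateDial; infer_instance
def pvWitness_newRotateDial : String × Int := ("L37", 5)

def Spec_newRotateDial (instr : String) (position : Int) (out : Int × Int) : Prop :=
  out = newRotateDial_alt instr position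
instance (instr : String) (position : Int) (out : Int × Int) : Decidable (Spec_newRotateDial instr position out) := by
  unfold Spec_newRotateDial; infer_instance

-- ===== CLAIM (what is proved, stated in full; the proofs are below) =====
def Claim_equal_newRotateDial : Prop := ∀ (instr : String) (position : Int), Dom_newRotateDial instr position → Pre_newRotateDial instr position → Spec_newRotateDial instr position (newRotateDial instr position)

-- ===== LEMMAS AND PROOFS =====

-- The crossing condition at step i (1 ≤ i ≤ 99) holds iff i equals B's i0.
lemma cross_iff (d p i : Int) (hd : d = 1 ∨ d = -1) (h1 : 1 ≤ i) (h2 : i ≤ 99) :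
    (PySem.Int.mod (p + d * i) 100 = 0) ↔ i = PySem.Int.mod (-d * p) 100 := by
  rw [PySem.Int.mod_eq_emod_of_pos (by norm_num),
      PySem.Int.mod_eq_emod_of_pos (by norm_num)]
  rcases hd with h | h <;> subst h <;> omega

-- A's counting loop over range(1, n+1) equals B's closed form, for n ≤ 99.
lemma loop_count (d p : Int) (hd : d = 1 ∨ d = -1) (n : Nat) (hn : n ≤ 99) (acc : Int) :
    (PySem.List.pyRange 1 ((n : Int) + 1) 1).foldl
      (fun cr i => if PySem.Int.mod (p + d * i) 100 == 0 then cr + 1 else cr) acc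
    = acc + (if 0 < PySem.Int.mod (-d * p) 100 ∧ PySem.Int.mod (-d * p) 100 ≤ (n : Int) then 1 else 0) := by
  have hi0 : 0 ≤ PySem.Int.mod (-d * p) 100 := by
    rw [PySem.Int.mod_eq_emod_of_pos (by norm_num)]
    exact Int.emod_nonneg _ (by norm_num)
  induction n generalizing acc with
  | zero =>
    rw [show ((0 : Nat) : Int) + 1 = 1 by norm_num, PySem.List.pyRange_one_eq_nil (by norm_num)]
    simp only [List.foldl_nil]
    have : ¬ (0 < PySem.Int.mod (-d * p) 100 ∧ PySem.Int.mod (-d * p) 100 ≤ ((0 : Nat) : Int)) := by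
      push_cast; omega
    rw [if_neg this]; ring
  | succ m ih =>
    have hm : m ≤ 99 := by omega
    have hsplit : PySem.List.pyRange 1 (((m + 1 : Nat) : Int) + 1) 1
        = PySem.List.pyRange 1 ((m : Int) + 1) 1 ++ [(m : Int) + 1] := by
      have := PySem.List.pyRange_one_succ_right (a := 1) (b := (m : Int) + 1) (by omega)
      push_cast
      convert this using 3
    rw [hsplit, List.foldl_append, ih hm, List.foldl_cons, List.foldl_nil]
    have hcross := cross_iff d p ((m : Int) + 1) hd (by omega) (by omega)
    by_cases hc : PySem.Int.mod (p + d * ((m : Int) + 1)) 100 = 0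
    · have hi0eq : ((m : Int) + 1) = PySem.Int.mod (-d * p) 100 := hcross.mp hc
      rw [if_pos (by exact_mod_cast beq_iff_eq.mpr hc)]
      rw [if_neg (by omega), if_pos (by push_cast; omega)]
      ring
    · have hne : ((m : Int) + 1) ≠ PySem.Int.mod (-d * p) 100 := fun h => hc (hcross.mpr h)
      rw [if_neg (by simpa using hc)]
      have : (0 < PySem.Int.mod (-d * p) 100 ∧ PySem.Int.mod (-d * p) 100 ≤ ((m + 1 : Nat) : Int))
          ↔ (0 < PySem.Int.mod (-d * p) 100 ∧ PySem.Int.mod (-d * p) 100 ≤ (m : Int)) := by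
        push_cast; omega
      rw [if_congr this rfl rfl]

-- ===== VERDICT (by name: the statement is the Claim_ definition above) =====
theorem newRotateDial_spec : Claim_equal_newRotateDial := by
  intro instr position _ hpre
  unfold Spec_newRotateDial newRotateDial newRotateDial_alt
  obtain ⟨h1, h2⟩ := hpre
  obtain ⟨c, hc⟩ := Option.isSome_iff_exists.mp h1
  obtain ⟨steps, hs⟩ := Option.isSome_iff_exists.mp h2
  rw [hc, hs]
  simp only
  set d : Int := if c = 'L' then -1 else 1 with hd
  have hdval : d = 1 ∨ d = -1 := by rw [hd]; split_ifs <;> simp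
  have hrnn : 0 ≤ PySem.Int.mod steps 100 := by
    rw [PySem.Int.mod_eq_emod_of_pos (by norm_num)]
    exact Int.emod_nonneg _ (by norm_num)
  have hrlt : PySem.Int.mod steps 100 < 100 := by
    rw [PySem.Int.mod_eq_emod_of_pos (by norm_num)]
    exact Int.emod_lt_of_pos _ (by norm_num)
  have hcast : PySem.Int.mod steps 100 = (((PySem.Int.mod steps 100).toNat : Nat) : Int) := by omega
  have := loop_count d position hdval (PySem.Int.mod steps 100).toNat (by omega)
    (PySem.Int.floordiv steps 100)
  rw [← hcast] at this
  rw [this]
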